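-- pv_equiv track=rewrite | github.com/JanavBansal/IntentFlowAI | intentflow_ai/backtest/core.py | _stable_topk
-- ===== SOURCE A (Python) =====
-- from typing import Dict, Optional
--
-- def _stable_topk(ranks_today: Dict[str, int], ranks_prev: Optional[Dict[str, int]], k: int, max_drop: int = 20):
--     """Keep prior winners unless they fall sharply, then fill with today's best."""
--
--     ranks_prev = ranks_prev or {}
--     keep = [
--         t
--         for t, prev_rank in ranks_prev.items()
--         if prev_rank <= k and t in ranks_today and ranks_today[t] <= prev_rank + max_drop
--     ]
--     keep_set = set(keep)
--     ordered_today = sorted(ranks_today.items(), key=lambda x: x[1])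
--     add = [t for t, _ in ordered_today if t not in keep_set][: max(0, k - len(keep))]
--     return keep + add
-- ===== SOURCE B (Python) =====
-- def _stable_topk(ranks_today, ranks_prev, k, max_drop=20):
--     """Keep prior winners unless they fall sharply, then fill with today's best
--     by a one-pass bounded insertion (partial top-n selection) instead of a full sort."""
--     ranks_prev = ranks_prev or {}
--     keep = [
--         t
--         for t, prev_rank in ranks_prev.items()
--         if prev_rank <= k and t in ranks_today and ranks_today[t] <= prev_rank + max_drop
--     ]
--     keep_set = set(keep)
--     n = max(0, k - len(keep))
--     best = []  # candidates seen so far, ordered by rank (stable), capped at n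
--     for t, r in ranks_today.items():
--         if t in keep_set:
--             continue
--         i = 0
--         while i < len(best) and best[i][1] <= r:
--             i += 1
--         best.insert(i, (t, r))
--         if len(best) > n:
--             best.pop()
--     return keep + [t for t, _ in best]
-- ===== Notes on version B (the rewrite author's own statement) =====
-- stated objective: alternative
-- what changed: The fill step's full sort of today's ranks followed by filtering and slicing is replaced by a single pass over today's items that maintains a rank-ordered buffer capped at the number of free slots (an online bounded stable insertion / partial top-n selection); the keep computation is unchanged.
import Mathlib
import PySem

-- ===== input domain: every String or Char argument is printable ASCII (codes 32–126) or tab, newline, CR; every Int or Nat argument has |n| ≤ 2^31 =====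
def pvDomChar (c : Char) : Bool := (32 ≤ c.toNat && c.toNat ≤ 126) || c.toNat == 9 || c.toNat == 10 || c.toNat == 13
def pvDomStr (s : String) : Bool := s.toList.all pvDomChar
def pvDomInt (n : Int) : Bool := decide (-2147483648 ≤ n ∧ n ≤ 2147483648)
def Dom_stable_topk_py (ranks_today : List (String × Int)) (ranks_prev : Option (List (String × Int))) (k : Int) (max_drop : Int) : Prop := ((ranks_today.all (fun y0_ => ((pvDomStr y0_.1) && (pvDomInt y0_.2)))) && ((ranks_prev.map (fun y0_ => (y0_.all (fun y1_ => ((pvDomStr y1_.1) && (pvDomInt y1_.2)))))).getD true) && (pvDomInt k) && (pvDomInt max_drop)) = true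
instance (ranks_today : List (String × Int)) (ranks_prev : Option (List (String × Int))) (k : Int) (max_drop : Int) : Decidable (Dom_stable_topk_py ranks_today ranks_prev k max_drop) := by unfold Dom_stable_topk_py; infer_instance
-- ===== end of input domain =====

-- B replaces A's full sort + filter + slice of today's ranks by a single pass that
-- maintains a rank-ordered buffer capped at the number of slots still to fill
-- (a bounded stable insertion, i.e. an online partial top-n selection).

-- ===== PORT A =====
def stable_topk_py (ranks_today : List (String × Int)) (ranks_prev : Option (List (String × Int))) (k : Int) (max_drop : Int) : List String :=
  let todayD : PySem.Dict String Int := PySem.Dict.ofList ranks_today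
  let prevD : PySem.Dict String Int := PySem.Dict.ofList (ranks_prev.getD [])
  -- keep = [t for t, prev_rank in ranks_prev.items() if prev_rank <= k and t in ranks_today and ranks_today[t] <= prev_rank + max_drop]
  -- (the getD default 0 is never used: the lookup is guarded by contains in the conjunct before it)
  let keep : List String := (prevD.items.filter (fun p =>
      decide (p.2 ≤ k) && todayD.contains p.1 && decide (todayD.getD p.1 0 ≤ p.2 + max_drop))).map (·.1)
  let keep_set : PySem.Set String := PySem.Set.ofList keep
  let ordered_today := PySem.List.sorted todayD.items (fun x => x.2)
  let add : List String := PySem.List.slice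
      ((ordered_today.filter (fun p => !(PySem.Set.contains keep_set p.1))).map (·.1))
      none (some (max 0 (k - (keep.length : Int))))
  keep ++ add

-- ===== PORT B =====
-- B's while-loop "i = 0; while i < len(best) and best[i][1] <= r: i += 1; best.insert(i, (t, r))"
-- as structural recursion: walk past entries whose rank is <= r, insert before the first larger one.
def pvInsRank (x : String × Int) : List (String × Int) → List (String × Int)
  | [] => [x]
  | y :: ys => if y.2 ≤ x.2 then y :: pvInsRank x ys else x :: y :: ys

def stable_topk_py_alt (ranks_today : List (String × Int)) (ranks_prev : Option (List (String × Int))) (k : Int) (max_drop : Int) : List String :=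
  let todayD : PySem.Dict String Int := PySem.Dict.ofList ranks_today
  let prevD : PySem.Dict String Int := PySem.Dict.ofList (ranks_prev.getD [])
  let keep : List String := (prevD.items.filter (fun p =>
      decide (p.2 ≤ k) && todayD.contains p.1 && decide (todayD.getD p.1 0 ≤ p.2 + max_drop))).map (·.1)
  let keep_set : PySem.Set String := PySem.Set.ofList keep
  let n : Int := max 0 (k - (keep.length : Int))
  let best : List (String × Int) := todayD.items.foldl (fun best p =>
      if PySem.Set.contains keep_set p.1 then best
      else
        let b' := pvInsRank p best
        if (b'.length : Int) > n then b'.dropLast else b') []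
  keep ++ best.map (·.1)

-- ===== PRECONDITION & SPEC =====
def Spec_stable_topk_py (ranks_today : List (String × Int)) (ranks_prev : Option (List (String × Int))) (k : Int) (max_drop : Int) (out : List String) : Prop := out = stable_topk_py_alt ranks_today ranks_prev k max_drop
instance (ranks_today : List (String × Int)) (ranks_prev : Option (List (String × Int))) (k : Int) (max_drop : Int) (out : List String) : Decidable (Spec_stable_topk_py ranks_today ranks_prev k max_drop out) := by unfold Spec_stable_topk_py; infer_instance

-- ===== CLAIM (what is proved, stated in full; the proofs are below) =====
def Claim_equal_stable_topk_py : Prop := ∀ (ranks_today : List (String × Int)) (ranks_prev : Option (List (String × Int))) (k : Int) (max_drop : Int), Dom_stable_topk_py ranks_today ranks_prev k max_drop → Spec_stable_topk_py ranks_today ranks_prev k max_drop (stable_topk_py ranks_today ranks_prev k max_drop)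

-- ===== LEMMAS AND PROOFS =====

-- pvInsRank is PySem's insertBy with the "strictly smaller rank" test.
theorem pvInsRank_eq_insertBy (x : String × Int) (l : List (String × Int)) :
    pvInsRank x l = PySem.List.insertBy (fun a b => decide (a.2 < b.2)) x l := by
  induction l with
  | nil => rfl
  | cons y ys ih =>
    simp only [pvInsRank, PySem.List.insertBy]
    by_cases h : y.2 ≤ x.2
    · rw [if_pos h, if_neg (by simpa using not_lt.mpr h), ih]
    · rw [if_neg h, if_pos (by simpa using not_le.mp h)]

theorem pvFoldl_insRank_eq_sorted (l : List (String × Int)) :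
    l.foldl (fun acc x => pvInsRank x acc) [] = PySem.List.sorted l (fun p => p.2) := by
  rw [PySem.List.sorted_eq_foldl_insertBy]
  apply PySem.List.foldl_congr_mem
  intro acc x _
  exact pvInsRank_eq_insertBy x acc

-- truncating the list before a bounded insertion does not change the truncated result
theorem pvTake_insRank (s : List (String × Int)) :
    ∀ (n : Nat) (x : String × Int),
      (pvInsRank x (s.take n)).take n = (pvInsRank x s).take n := by
  induction s with
  | nil => intro n x; simp
  | cons a t ih =>
    intro n x
    cases n with
    | zero => rfl
    | succ m =>
      simp only [List.take_succ_cons, pvInsRank]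
      by_cases h : a.2 ≤ x.2
      · simp only [if_pos h, List.take_succ_cons, ih m x]
      · cases m with
        | zero => simp [if_neg h]
        | succ m' =>
          simp only [if_neg h, List.take_succ_cons]
          rw [List.take_take, Nat.min_eq_left (by omega)]

-- the capped insertion step, on a state that is "take n" of a full state
theorem pvInsRank_length (y : String × Int) (l : List (String × Int)) :
    (pvInsRank y l).length = l.length + 1 := by
  induction l with
  | nil => rfl
  | cons a t ih => simp only [pvInsRank]; split <;> simp [ih]

theorem pvStep_take (s : List (String × Int)) (n : Nat) (x : String × Int) :
    (let b' := pvInsRank x (s.take n);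
     if n < b'.length then b'.dropLast else b') = (pvInsRank x s).take n := by
  have h1 := pvInsRank_length x (s.take n)
  have h2 : (s.take n).length = min n s.length := List.length_take
  by_cases h : n < (pvInsRank x (s.take n)).length
  · have hl : (pvInsRank x (s.take n)).length = n + 1 := by omega
    simp only [if_pos h, List.dropLast_eq_take, hl]
    simpa using pvTake_insRank s n x
  · have hsn : s.length < n := by omega
    rw [show s.take n = s from List.take_of_length_le (le_of_lt hsn)] at h ⊢
    simp only [if_neg h]
    exact (List.take_of_length_le (by rw [pvInsRank_length]; omega)).symm

-- folding the capped insertion = take n of folding the uncapped insertion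
theorem pvCapFold (l : List (String × Int)) (n : Nat) :
    l.foldl (fun b x =>
      let b' := pvInsRank x b; if n < b'.length then b'.dropLast else b') [] =
    (l.foldl (fun acc x => pvInsRank x acc) []).take n := by
  induction l using List.reverseRecOn with
  | nil => simp
  | append_singleton l x ih =>
    simp only [List.foldl_append, List.foldl_cons, List.foldl_nil, ih]
    exact pvStep_take (l.foldl (fun acc x => pvInsRank x acc) []) n x

theorem pvInsRank_cons_of_lt (x : String × Int) (l : List (String × Int))
    (h : ∀ b ∈ l, x.2 < b.2) : pvInsRank x l = x :: l := by
  cases l with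
  | nil => rfl
  | cons a t =>
    simp only [pvInsRank, if_neg (not_le.mpr (h a (by simp)))]

-- filtering commutes with stable insertion into a rank-sorted list
theorem pvFilter_insRank (s : List (String × Int))
    (hs : s.Pairwise (fun a b => a.2 ≤ b.2)) (q : String × Int → Bool) (x : String × Int) :
    (pvInsRank x s).filter q =
      if q x then pvInsRank x (s.filter q) else s.filter q := by
  induction s with
  | nil => simp [pvInsRank, List.filter_singleton]
  | cons a t ih =>
    have hpa : ∀ b ∈ t, a.2 ≤ b.2 := fun b hb => (List.pairwise_cons.mp hs).1 b hb
    have hpt := (List.pairwise_cons.mp hs).2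
    by_cases h : a.2 ≤ x.2
    · simp only [pvInsRank, if_pos h, List.filter_cons, ih hpt]
      split_ifs with hqa hqx hqx <;> simp [pvInsRank, if_pos h, *]
    · have hx : x.2 < a.2 := not_le.mp h
      simp only [pvInsRank, if_neg h, List.filter_cons]
      split_ifs with hqx hqa hqa <;> try rfl
      · simp [pvInsRank, if_neg h, hqa]
      · rw [pvInsRank_cons_of_lt x (t.filter q)
          (fun b hb => lt_of_lt_of_le hx (hpa b (List.mem_of_mem_filter hb)))]

-- filter after stable sort = stable sort after filter
theorem pvFilter_sorted (l : List (String × Int)) (q : String × Int → Bool) :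
    (PySem.List.sorted l (fun p => p.2)).filter q =
      PySem.List.sorted (l.filter q) (fun p => p.2) := by
  rw [← pvFoldl_insRank_eq_sorted, ← pvFoldl_insRank_eq_sorted]
  induction l using List.reverseRecOn with
  | nil => rfl
  | append_singleton l x ih =>
    have hsorted : (l.foldl (fun acc x => pvInsRank x acc) []).Pairwise
        (fun a b => a.2 ≤ b.2) := by
      rw [pvFoldl_insRank_eq_sorted]
      exact PySem.List.sorted_pairwise l (fun p => p.2)
    simp only [List.foldl_append, List.foldl_cons, List.foldl_nil, List.filter_append,
      List.filter_cons]
    rw [pvFilter_insRank _ hsorted q x]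
    by_cases hqx : q x = true
    · simp [hqx, ih, List.foldl_append]
    · simp only [Bool.not_eq_true] at hqx
      simp [hqx, ih]

-- ===== VERDICT (by name: the statement is the Claim_ definition above) =====
theorem stable_topk_py_spec : Claim_equal_stable_topk_py := by
  intro ranks_today ranks_prev k max_drop _
  unfold Spec_stable_topk_py stable_topk_py stable_topk_py_alt
  simp only []
  set todayD : PySem.Dict String Int := PySem.Dict.ofList ranks_today with hT
  set prevD : PySem.Dict String Int := PySem.Dict.ofList (ranks_prev.getD []) with hP
  set keep : List String := (prevD.items.filter (fun p =>
      decide (p.2 ≤ k) && todayD.contains p.1 && decide (todayD.getD p.1 0 ≤ p.2 + max_drop))).map (·.1) with hK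
  set keep_set : PySem.Set String := PySem.Set.ofList keep with hS
  set nI : Int := max 0 (k - (keep.length : Int)) with hN
  have hN0 : 0 ≤ nI := le_max_left _ _
  congr 1
  -- the fold with the Int cap and the membership skip, rewritten as a filtered fold with a Nat cap
  have hstep : todayD.items.foldl (fun best p =>
      if PySem.Set.contains keep_set p.1 then best
      else
        let b' := pvInsRank p best
        if (b'.length : Int) > nI then b'.dropLast else b') [] =
      (todayD.items.filter (fun p => !(PySem.Set.contains keep_set p.1))).foldl
        (fun b x => let b' := pvInsRank x b; if nI.toNat < b'.length then b'.dropLast else b') [] := by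
    rw [← PySem.List.foldl_if_eq_foldl_filter]
    apply PySem.List.foldl_congr_mem
    intro b p _
    cases hc : PySem.Set.contains keep_set p.1
    · have hiff : ((pvInsRank p b).length : Int) > nI ↔ nI.toNat < (pvInsRank p b).length := by
        omega
      simp only [hc, Bool.not_false, Bool.false_eq_true, if_false, if_true, hiff]
    · simp [hc]
  rw [hstep, pvCapFold, pvFoldl_insRank_eq_sorted,
    PySem.List.slice_to _ hN0, ← pvFilter_sorted, ← List.map_take]
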